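-- pv_equiv track=rewrite | github.com/h33h/TelegramBackup | telegram_backup/telegram_api/entities.py | get_flat_entity_list
-- ===== SOURCE A (Python) =====
-- def get_flat_entity_list(entities):
--     """Flatten entities dictionary into a single list with consistent ordering.
--
--     Entities are sorted by:
--     1. Category (Channels, Supergroups, Groups, Users, Unknown)
--     2. Name (alphabetically within each category)
--
--     Args:
--         entities: Dictionary of categorized entities
--
--     Returns:
--         Flat list of all entities in consistent order
--     """
--     # Define category order for consistent display
--     category_order = ["Channels", "Supergroups", "Groups", "Users", "Unknown"]
--
--     flat_list = []
--     for category in category_order: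
--         if category in entities:
--             # Sort entities within category by name (case-insensitive)
--             sorted_entities = sorted(entities[category], key=lambda x: x[1].lower())
--             flat_list.extend(sorted_entities)
--
--     return flat_list
-- ===== SOURCE B (Python) =====
-- def get_flat_entity_list(entities):
--     """Flatten entities dictionary into a single list with consistent ordering.
--
--     Radix-style: one stable sort of all rank-tagged entities by lowercased
--     name only, then a stable distribution pass bucketing by category rank.
--     """
--     category_order = ["Channels", "Supergroups", "Groups", "Users", "Unknown"]
--     combined = [(rank, entity)
--                 for rank, category in enumerate(category_order)
--                 if category in entities
--                 for entity in entities[category]]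
--     by_name = sorted(combined, key=lambda t: t[1][1].lower())
--     return [entity
--             for rank in range(len(category_order))
--             for r, entity in by_name
--             if r == rank]
-- ===== Notes on version B (the rewrite author's own statement) =====
-- stated objective: alternative
-- what changed: Replaces A's five per-category sorts concatenated in fixed category order with a radix-style scheme: one stable sort of all rank-tagged entities by the secondary key (lowercased name) alone, followed by a stable distribution pass that buckets the name-sorted list by category rank.
import Mathlib
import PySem

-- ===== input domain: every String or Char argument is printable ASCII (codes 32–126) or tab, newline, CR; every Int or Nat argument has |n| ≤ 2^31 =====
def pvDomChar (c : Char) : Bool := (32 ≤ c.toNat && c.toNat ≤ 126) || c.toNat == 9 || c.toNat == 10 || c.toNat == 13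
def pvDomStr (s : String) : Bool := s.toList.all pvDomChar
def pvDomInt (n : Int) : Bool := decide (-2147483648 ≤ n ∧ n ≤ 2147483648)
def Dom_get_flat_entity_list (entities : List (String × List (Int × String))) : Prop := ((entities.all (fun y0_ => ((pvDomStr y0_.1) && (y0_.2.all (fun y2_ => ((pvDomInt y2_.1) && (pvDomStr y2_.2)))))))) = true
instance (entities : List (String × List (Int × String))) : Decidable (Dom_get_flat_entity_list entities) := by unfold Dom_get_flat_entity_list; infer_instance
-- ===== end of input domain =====

-- B replaces A's five per-category sorts (concatenated in fixed category order) by a radix-style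
-- scheme: one stable sort of rank-tagged entities by lowercased name only, then a stable
-- distribution pass bucketing by category rank; objective: alternative.

-- ===== PORT A =====
def get_flat_entity_list (entities : List (String × List (Int × String))) : List (Int × String) :=
  let category_order : List String := ["Channels", "Supergroups", "Groups", "Users", "Unknown"]
  category_order.foldl (fun flat_list category =>
    match (PySem.Dict.mk entities).get? category with
    | some es => flat_list ++ PySem.List.sorted es (fun x => PySem.Str.lower x.2)
    | none => flat_list) []

-- ===== PORT B =====
def get_flat_entity_list_alt (entities : List (String × List (Int × String))) : List (Int × String) :=
  let category_order : List String := ["Channels", "Supergroups", "Groups", "Users", "Unknown"]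
  let combined := (PySem.List.enumerate category_order).foldl (fun acc p =>
    match (PySem.Dict.mk entities).get? p.2 with
    | some es => acc ++ es.map (fun entity => (p.1, entity))
    | none => acc) []
  let by_name := PySem.List.sorted combined (fun t => PySem.Str.lower t.2.2)
  (PySem.List.pyRange 0 (category_order.length : Int) 1).foldl (fun out rank =>
    out ++ (by_name.filter (fun t => t.1 == rank)).map (fun t => t.2)) []

-- ===== PRECONDITION & SPEC =====
def Spec_get_flat_entity_list (entities : List (String × List (Int × String))) (out : List (Int × String)) : Prop := out = get_flat_entity_list_alt entities
instance (entities : List (String × List (Int × String))) (out : List (Int × String)) : Decidable (Spec_get_flat_entity_list entities out) := by unfold Spec_get_flat_entity_list; infer_instance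

-- ===== CLAIM (what is proved, stated in full; the proofs are below) =====
def Claim_equal_get_flat_entity_list : Prop := ∀ (entities : List (String × List (Int × String))), Dom_get_flat_entity_list entities → Spec_get_flat_entity_list entities (get_flat_entity_list entities)

-- ===== LEMMAS AND PROOFS =====

-- the secondary key (lowercased name) and the two insertion predicates hidden inside the sorts
def pvKey (x : Int × String) : String := PySem.Str.lower x.2

def pvLtA (a b : Int × String) : Bool := decide (pvKey a < pvKey b)

def pvLtN (a b : Int × (Int × String)) : Bool := decide (pvKey a.2 < pvKey b.2)

def pvLeN (a b : Int × (Int × String)) : Prop := pvKey a.2 ≤ pvKey b.2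

-- one tagged block of B's combined list: the category's entities tagged with its rank
def pvBlock (entities : List (String × List (Int × String))) (j : Int) (c : String) :
    List (Int × (Int × String)) :=
  match (PySem.Dict.mk entities).get? c with
  | some es => es.map (fun e => (j, e))
  | none => []

-- A's per-category sort and B's name-only sort, as insertion folds (both rfl)
theorem pv_sortedA_eq (es : List (Int × String)) :
    PySem.List.sorted es (fun x => PySem.Str.lower x.2)
      = es.foldl (fun acc x => PySem.List.insertBy pvLtA x acc) [] := rfl

theorem pv_sortedN_eq (xs : List (Int × (Int × String))) :
    PySem.List.sorted xs (fun t => PySem.Str.lower t.2.2)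
      = xs.foldl (fun acc x => PySem.List.insertBy pvLtN x acc) [] := rfl

-- filtering past an inserted element the filter drops
theorem pv_insertBy_filter_false (q : Int × (Int × String) → Bool)
    (x : Int × (Int × String)) (hq : q x = false) :
    ∀ l : List (Int × (Int × String)),
      (PySem.List.insertBy pvLtN x l).filter q = l.filter q := by
  intro l
  induction l with
  | nil => simp [PySem.List.insertBy, hq]
  | cons a l ih =>
      by_cases hxa : pvLtN x a = true
      · simp [PySem.List.insertBy, hxa, List.filter_cons, hq]
      · rw [show PySem.List.insertBy pvLtN x (a :: l)
              = a :: PySem.List.insertBy pvLtN x l by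
            simp [PySem.List.insertBy, hxa]]
        simp only [List.filter_cons]
        cases q a <;> simp [ih]

-- an element below every member of m is inserted at the front
theorem pv_insertBy_front (x : Int × (Int × String)) (m : List (Int × (Int × String)))
    (h : ∀ y ∈ m, pvLtN x y = true) :
    PySem.List.insertBy pvLtN x m = x :: m := by
  cases m with
  | nil => rfl
  | cons a m => simp [PySem.List.insertBy, h a (by simp)]

-- on a name-sorted list, filtering commutes with inserting a kept element
theorem pv_insertBy_filter_true (q : Int × (Int × String) → Bool)
    (x : Int × (Int × String)) (hq : q x = true) :
    ∀ l : List (Int × (Int × String)), l.Pairwise pvLeN →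
      (PySem.List.insertBy pvLtN x l).filter q
        = PySem.List.insertBy pvLtN x (l.filter q) := by
  intro l
  induction l with
  | nil => simp [PySem.List.insertBy, hq]
  | cons a l ih =>
      intro hp
      rw [List.pairwise_cons] at hp
      obtain ⟨ha, hl⟩ := hp
      by_cases hxa : pvLtN x a = true
      · have hfront : ∀ y ∈ (a :: l).filter q, pvLtN x y = true := by
          intro y hy
          have hy' : y ∈ a :: l := List.mem_of_mem_filter hy
          rcases List.mem_cons.mp hy' with rfl | hyl
          · exact hxa
          · have h1 : pvKey x.2 < pvKey a.2 := of_decide_eq_true hxa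
            have h2 : pvKey a.2 ≤ pvKey y.2 := ha y hyl
            exact decide_eq_true (lt_of_lt_of_le h1 h2)
        rw [pv_insertBy_front x _ hfront]
        simp [PySem.List.insertBy, hxa, List.filter_cons, hq]
      · rw [show PySem.List.insertBy pvLtN x (a :: l)
              = a :: PySem.List.insertBy pvLtN x l by
            simp [PySem.List.insertBy, hxa]]
        simp only [List.filter_cons]
        cases hqa : q a
        · simpa using ih hl
        · rw [ih hl]
          simp [show PySem.List.insertBy pvLtN x (a :: l.filter q)
              = a :: PySem.List.insertBy pvLtN x (l.filter q) by
            simp [PySem.List.insertBy, hxa]]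

-- insertion preserves the name-sortedness invariant
theorem pv_insertBy_pairwise (x : Int × (Int × String)) :
    ∀ l : List (Int × (Int × String)), l.Pairwise pvLeN →
      (PySem.List.insertBy pvLtN x l).Pairwise pvLeN := by
  intro l
  induction l with
  | nil => intro _; simp [PySem.List.insertBy, List.pairwise_cons]
  | cons a l ih =>
      intro hp
      rw [List.pairwise_cons] at hp
      obtain ⟨ha, hl⟩ := hp
      by_cases hxa : pvLtN x a = true
      · rw [show PySem.List.insertBy pvLtN x (a :: l) = x :: a :: l by
            simp [PySem.List.insertBy, hxa]]
        have hxalt : pvKey x.2 < pvKey a.2 := of_decide_eq_true hxa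
        refine List.pairwise_cons.mpr ⟨?_, List.pairwise_cons.mpr ⟨ha, hl⟩⟩
        intro y hy
        rcases List.mem_cons.mp hy with rfl | hyl
        · exact le_of_lt hxalt
        · exact le_trans (le_of_lt hxalt) (ha y hyl)
      · rw [show PySem.List.insertBy pvLtN x (a :: l)
              = a :: PySem.List.insertBy pvLtN x l by
            simp [PySem.List.insertBy, hxa]]
        refine List.pairwise_cons.mpr ⟨?_, ih hl⟩
        intro y hy
        rw [PySem.List.mem_insertBy] at hy
        rcases hy with rfl | hyl
        · exact le_of_not_gt (fun h => hxa (decide_eq_true h))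
        · exact ha y hyl

-- filtering commutes with the whole insertion-sort fold
theorem pv_filter_foldl (q : Int × (Int × String) → Bool) :
    ∀ (xs acc : List (Int × (Int × String))), acc.Pairwise pvLeN →
      ((xs.foldl (fun acc x => PySem.List.insertBy pvLtN x acc) acc).filter q)
        = (xs.filter q).foldl (fun acc x => PySem.List.insertBy pvLtN x acc)
            (acc.filter q) := by
  intro xs
  induction xs with
  | nil => intro acc _; rfl
  | cons x xs ih =>
      intro acc hacc
      simp only [List.foldl, List.filter_cons]
      have hacc' := pv_insertBy_pairwise x acc hacc
      cases hq : q x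
      · rw [ih _ hacc', pv_insertBy_filter_false q x hq acc]
        simp
      · rw [ih _ hacc', pv_insertBy_filter_true q x hq acc hacc]
        simp

-- filtering a name-sorted list by rank = name-sorting the rank's elements
theorem pv_filter_sortN (q : Int × (Int × String) → Bool)
    (xs : List (Int × (Int × String))) :
    ((xs.foldl (fun acc x => PySem.List.insertBy pvLtN x acc) []).filter q)
      = (xs.filter q).foldl (fun acc x => PySem.List.insertBy pvLtN x acc) [] := by
  simpa using pv_filter_foldl q xs [] (by simp)

-- tagging commutes with insertion
theorem pv_insertBy_map (i : Int) (x : Int × String) :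
    ∀ acc : List (Int × String),
      PySem.List.insertBy pvLtN (i, x) (acc.map (fun e => (i, e)))
        = (PySem.List.insertBy pvLtA x acc).map (fun e => (i, e)) := by
  intro acc
  induction acc with
  | nil => rfl
  | cons a acc ih =>
      have hsame : pvLtN (i, x) (i, a) = pvLtA x a := rfl
      by_cases hpa : pvLtA x a = true <;>
        simp [PySem.List.insertBy, hsame, hpa, ih]

-- tagging commutes with the whole sort fold
theorem pv_foldl_ins_map (i : Int) :
    ∀ (xs acc : List (Int × String)),
      (xs.map (fun e => (i, e))).foldl
          (fun acc y => PySem.List.insertBy pvLtN y acc) (acc.map (fun e => (i, e)))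
        = (xs.foldl (fun acc x => PySem.List.insertBy pvLtA x acc) acc).map
            (fun e => (i, e)) := by
  intro xs
  induction xs with
  | nil => intro acc; rfl
  | cons x xs ih =>
      intro acc
      simp only [List.map, List.foldl]
      rw [pv_insertBy_map i x acc]
      exact ih _

-- filtering one tagged block by a rank keeps all of it or none of it
theorem pv_filter_block (entities : List (String × List (Int × String)))
    (j i : Int) (c : String) :
    (pvBlock entities j c).filter (fun t => t.1 == i)
      = if j = i then pvBlock entities j c else [] := by
  cases hget : (PySem.Dict.mk entities).get? c with
  | none => simp [pvBlock, hget]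
  | some es =>
      simp only [pvBlock, hget, List.filter_map]
      by_cases hji : j = i
      · simp [Function.comp_def, hji]
      · simp [Function.comp_def, hji]

-- sorting one tagged block by name and dropping the tag = A's per-category sort
theorem pv_sort_block (entities : List (String × List (Int × String)))
    (i : Int) (c : String) :
    (((pvBlock entities i c).foldl
        (fun acc x => PySem.List.insertBy pvLtN x acc) []).map (fun t => t.2))
      = (match (PySem.Dict.mk entities).get? c with
         | some es => PySem.List.sorted es (fun x => PySem.Str.lower x.2)
         | none => []) := by
  cases hget : (PySem.Dict.mk entities).get? c with
  | none => simp [pvBlock, hget]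
  | some es =>
      simp only [pvBlock, hget]
      have := pv_foldl_ins_map i es []
      simp only [List.map_nil] at this
      rw [this, pv_sortedA_eq, List.map_map]
      simp [Function.comp_def]

-- rewrite A's accumulating fold as a flatMap
theorem pv_A_flatMap (entities : List (String × List (Int × String))) (cats : List String) :
    cats.foldl (fun flat_list category =>
        match (PySem.Dict.mk entities).get? category with
        | some es => flat_list ++ PySem.List.sorted es (fun x => PySem.Str.lower x.2)
        | none => flat_list) []
      = cats.flatMap (fun c =>
          match (PySem.Dict.mk entities).get? c with
          | some es => PySem.List.sorted es (fun x => PySem.Str.lower x.2)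
          | none => []) := by
  have hfun : (fun (flat_list : List (Int × String)) category =>
        match (PySem.Dict.mk entities).get? category with
        | some es => flat_list ++ PySem.List.sorted es (fun x => PySem.Str.lower x.2)
        | none => flat_list)
      = (fun flat_list category => flat_list ++
          (match (PySem.Dict.mk entities).get? category with
           | some es => PySem.List.sorted es (fun x => PySem.Str.lower x.2)
           | none => [])) := by
    funext flat_list category
    cases (PySem.Dict.mk entities).get? category <;> simp
  rw [hfun, PySem.List.foldl_append_eq_flatMap]
  simp

-- rewrite B's combined-building fold as a flatMap of tagged blocks
theorem pv_B_flatMap (entities : List (String × List (Int × String)))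
    (ps : List (Int × String)) :
    ps.foldl (fun acc p =>
        match (PySem.Dict.mk entities).get? p.2 with
        | some es => acc ++ es.map (fun entity => (p.1, entity))
        | none => acc) []
      = ps.flatMap (fun p => pvBlock entities p.1 p.2) := by
  have hfun : (fun (acc : List (Int × (Int × String))) p =>
        match (PySem.Dict.mk entities).get? p.2 with
        | some es => acc ++ es.map (fun entity => (p.1, entity))
        | none => acc)
      = (fun (acc : List (Int × (Int × String))) (p : Int × String) =>
          acc ++ pvBlock entities p.1 p.2) := by
    funext acc p
    simp only [pvBlock]
    cases (PySem.Dict.mk entities).get? p.2 <;> simp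
  rw [hfun, PySem.List.foldl_append_eq_flatMap]
  simp

-- ===== VERDICT (by name: the statement is the Claim_ definition above) =====
theorem get_flat_entity_list_spec : Claim_equal_get_flat_entity_list := by
  intro entities _
  unfold Spec_get_flat_entity_list
  show get_flat_entity_list entities = get_flat_entity_list_alt entities
  simp only [get_flat_entity_list, get_flat_entity_list_alt]
  rw [pv_A_flatMap, pv_B_flatMap, pv_sortedN_eq]
  rw [show PySem.List.enumerate ["Channels", "Supergroups", "Groups", "Users", "Unknown"]
        = [((0:Int), "Channels"), (1, "Supergroups"), (2, "Groups"),
           (3, "Users"), (4, "Unknown")] from rfl]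
  rw [show PySem.List.pyRange 0
        (((["Channels", "Supergroups", "Groups", "Users", "Unknown"] : List String).length : Nat) : Int) 1
        = [(0:Int), 1, 2, 3, 4] from by decide]
  simp only [List.flatMap_cons, List.flatMap_nil, List.append_nil, List.foldl,
    List.nil_append]
  rw [pv_filter_sortN, pv_filter_sortN, pv_filter_sortN, pv_filter_sortN, pv_filter_sortN]
  simp only [List.filter_append, pv_filter_block]
  norm_num
  rw [pv_sort_block, pv_sort_block, pv_sort_block, pv_sort_block, pv_sort_block]
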